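-- pv_equiv track=rewrite | github.com/MolchanovaT/Homework_tests | main.py | get_directory
-- ===== SOURCE A (Python) =====
-- directories = {
--     '1': ['2207 876234', '11-2', '5455 028765'],
--     '2': ['10006'],
--     '3': ['311 020203']
-- }
--
-- def get_directory(doc_number):
--     res = "Полки с таким документом не найдено"
--     for shelf_key in directories.keys():
--         list_numbers = directories.get(shelf_key)
--         for num in list_numbers:
--             if num == doc_number:
--                 res = shelf_key
--                 return res
--     return res
-- ===== SOURCE B (Python) =====
-- directories = {
--     '1': ['2207 876234', '11-2', '5455 028765'],
--     '2': ['10006'],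
--     '3': ['311 020203']
-- }
--
-- _index = {}
-- for _key, _nums in directories.items():
--     for _num in _nums:
--         _index.setdefault(_num, _key)
--
-- def get_directory(doc_number):
--     return _index.get(doc_number, "Полки с таким документом не найдено")
-- ===== Notes on version B (the rewrite author's own statement) =====
-- stated objective: simpler
-- what changed: Replaces the nested scan over shelves and their document lists by a module-level inverse index (document number -> shelf key, first shelf wins via setdefault) so the lookup is a single dict.get.
import Mathlib
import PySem

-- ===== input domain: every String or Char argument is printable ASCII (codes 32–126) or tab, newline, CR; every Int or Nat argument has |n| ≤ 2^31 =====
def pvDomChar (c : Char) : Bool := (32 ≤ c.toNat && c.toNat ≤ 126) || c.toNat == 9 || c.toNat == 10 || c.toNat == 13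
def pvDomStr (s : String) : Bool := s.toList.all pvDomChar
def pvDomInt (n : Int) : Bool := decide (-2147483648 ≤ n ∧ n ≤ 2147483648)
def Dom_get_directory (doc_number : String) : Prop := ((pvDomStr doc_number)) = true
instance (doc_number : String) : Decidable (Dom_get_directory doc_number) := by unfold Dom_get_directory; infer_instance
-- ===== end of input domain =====

-- B replaces A's nested scan with a precomputed inverse index (first shelf wins), making the lookup a single dict.get; objective: simpler.

-- ===== PORT A =====
def pvDirectories : PySem.Dict String (List String) :=
  PySem.Dict.ofList [("1", ["2207 876234", "11-2", "5455 028765"]),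
                     ("2", ["10006"]),
                     ("3", ["311 020203"])]

-- inner 'for num in list_numbers' loop with early return
def pvInnerA (shelf_key : String) (nums : List String) (doc_number : String) : Option String :=
  match nums with
  | [] => none
  | num :: rest => if num == doc_number then some shelf_key else pvInnerA shelf_key rest doc_number

-- outer 'for shelf_key in directories.keys()' loop
def pvOuterA (keys : List String) (doc_number : String) : String :=
  match keys with
  | [] => "Полки с таким документом не найдено"
  | k :: ks =>
    match pvInnerA k ((pvDirectories.get? k).getD []) doc_number with
    | some res => res
    | none => pvOuterA ks doc_number

def get_directory (doc_number : String) : String :=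
  pvOuterA pvDirectories.keys doc_number

-- ===== PORT B =====
-- module-level index build: setdefault(num, key) over directories.items()
def pvIndex : PySem.Dict String String :=
  pvDirectories.items.foldl
    (fun d p => p.2.foldl (fun d num => if d.contains num then d else d.insert num p.1) d)
    PySem.Dict.empty

def get_directory_alt (doc_number : String) : String :=
  pvIndex.getD doc_number "Полки с таким документом не найдено"

-- ===== PRECONDITION & SPEC =====
def Spec_get_directory (doc_number : String) (out : String) : Prop := out = get_directory_alt doc_number
instance (doc_number : String) (out : String) : Decidable (Spec_get_directory doc_number out) := by unfold Spec_get_directory; infer_instance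

-- ===== CLAIM (what is proved, stated in full; the proofs are below) =====
def Claim_equal_get_directory : Prop := ∀ (doc_number : String), Dom_get_directory doc_number → Spec_get_directory doc_number (get_directory doc_number)

-- ===== LEMMAS AND PROOFS =====

theorem pvIndex_eval : pvIndex = PySem.Dict.mk
    [("2207 876234", "1"), ("11-2", "1"), ("5455 028765", "1"),
     ("10006", "2"), ("311 020203", "3")] := by rfl

theorem pvKeys_eval : pvDirectories.keys = ["1", "2", "3"] := by rfl

theorem pvGet1 : pvDirectories.get? "1" = some ["2207 876234", "11-2", "5455 028765"] := by rfl
theorem pvGet2 : pvDirectories.get? "2" = some ["10006"] := by rfl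
theorem pvGetEmpty (doc : String) :
    (PySem.Dict.mk ([] : List (String × String))).get? doc = none := by rfl

theorem pvGet3 : pvDirectories.get? "3" = some ["311 020203"] := by rfl

-- ===== VERDICT (by name: the statement is the Claim_ definition above) =====
theorem get_directory_spec : Claim_equal_get_directory := by
  intro doc _
  unfold Spec_get_directory
  by_cases h1 : "2207 876234" = doc
  · subst h1; decide
  by_cases h2 : "11-2" = doc
  · subst h2; decide
  by_cases h3 : "5455 028765" = doc
  · subst h3; decide
  by_cases h4 : "10006" = doc
  · subst h4; decide
  by_cases h5 : "311 020203" = doc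
  · subst h5; decide
  simp [get_directory, get_directory_alt, pvOuterA, pvInnerA, pvKeys_eval, pvGet1, pvGet2,
        pvGet3, pvIndex_eval, PySem.Dict.getD, PySem.Dict.get?_mk_cons, pvGetEmpty, h1, h2, h3, h4, h5]
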